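-- pv_equiv track=rewrite | github.com/jclike-jcol/pacelkin | imported/app/main.py | _kpi_summary
-- ===== SOURCE A (Python) =====
-- def _kpi_summary(entries):
--     summary = {
--         "total_invites": 0,
--         "total_events": 0,
--         "total_new_connections": 0,
--         "total_profile_views": 0,
--         "entries_count": len(entries),
--     }
--     for item in entries:
--         summary["total_invites"] += int(item.get("connection_invites") or 0)
--         summary["total_events"] += int(item.get("events_attended") or 0)
--         summary["total_new_connections"] += int(item.get("new_connections") or 0)
--         summary["total_profile_views"] += int(item.get("profile_views") or 0)
--     return summary
-- ===== SOURCE B (Python) =====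
-- def _kpi_summary(entries):
--     def total(key):
--         return sum(int(item.get(key) or 0) for item in entries)
--     return {
--         "total_invites": total("connection_invites"),
--         "total_events": total("events_attended"),
--         "total_new_connections": total("new_connections"),
--         "total_profile_views": total("profile_views"),
--         "entries_count": len(entries),
--     }
-- ===== Notes on version B (the rewrite author's own statement) =====
-- stated objective: simpler
-- what changed: Replaces the single loop mutating four accumulators in a pre-built dict with a direct dict literal whose four totals are each computed by an independent generator-expression sum over entries.
import Mathlib
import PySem

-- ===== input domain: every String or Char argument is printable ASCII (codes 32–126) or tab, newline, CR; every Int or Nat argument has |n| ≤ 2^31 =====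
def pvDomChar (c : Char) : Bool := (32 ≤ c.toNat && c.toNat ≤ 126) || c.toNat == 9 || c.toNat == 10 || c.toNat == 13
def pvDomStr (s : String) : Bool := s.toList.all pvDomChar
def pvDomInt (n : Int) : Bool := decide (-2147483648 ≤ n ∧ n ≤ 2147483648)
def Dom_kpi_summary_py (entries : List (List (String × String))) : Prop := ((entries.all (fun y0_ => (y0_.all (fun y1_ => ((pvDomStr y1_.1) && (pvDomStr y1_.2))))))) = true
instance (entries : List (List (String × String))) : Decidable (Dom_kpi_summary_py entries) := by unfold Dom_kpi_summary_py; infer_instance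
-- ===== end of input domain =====

-- B replaces A's single accumulating loop over a mutated dict by a dict literal whose
-- four totals are each an independent sum over entries (objective: simpler).

-- int(item.get(k) or 0): missing key or empty (falsy) string -> 0, else int(v).
-- Exact under Pre_ (which guarantees ofStr? succeeds on every non-empty looked-up value).
def pvCoerce (item : List (String × String)) (k : String) : Int :=
  match (PySem.Dict.mk item).get? k with
  | none => 0
  | some v => if v = "" then 0 else (PySem.Int.ofStr? v).getD 0

-- ===== PORT A =====
-- loop body of A: the four 'summary[k] += ...' updates for one item
def pvStepA (s : PySem.Dict String Int) (item : List (String × String)) : PySem.Dict String Int :=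
  let s := s.insert "total_invites" (s.getD "total_invites" 0 + pvCoerce item "connection_invites")
  let s := s.insert "total_events" (s.getD "total_events" 0 + pvCoerce item "events_attended")
  let s := s.insert "total_new_connections" (s.getD "total_new_connections" 0 + pvCoerce item "new_connections")
  let s := s.insert "total_profile_views" (s.getD "total_profile_views" 0 + pvCoerce item "profile_views")
  s

def kpi_summary_py (entries : List (List (String × String))) : List (String × Int) :=
  let summary : PySem.Dict String Int :=
    PySem.Dict.ofList [("total_invites", 0), ("total_events", 0),
      ("total_new_connections", 0), ("total_profile_views", 0),
      ("entries_count", (entries.length : Int))]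
  let summary := entries.foldl pvStepA summary
  summary.items

-- ===== PORT B =====
def kpi_summary_py_alt (entries : List (List (String × String))) : List (String × Int) :=
  [("total_invites", (entries.map (fun item => pvCoerce item "connection_invites")).sum),
   ("total_events", (entries.map (fun item => pvCoerce item "events_attended")).sum),
   ("total_new_connections", (entries.map (fun item => pvCoerce item "new_connections")).sum),
   ("total_profile_views", (entries.map (fun item => pvCoerce item "profile_views")).sum),
   ("entries_count", (entries.length : Int))]

-- ===== PRECONDITION & SPEC =====
-- Pre_ excludes exactly the inputs where Python's int() raises ValueError: an item whose
-- looked-up KPI value is a non-empty string that is not a valid int literal.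
def Pre_kpi_summary_py (entries : List (List (String × String))) : Prop :=
  (entries.all (fun item =>
    ["connection_invites", "events_attended", "new_connections", "profile_views"].all (fun k =>
      match (PySem.Dict.mk item).get? k with
      | none => true
      | some v => v == "" || (PySem.Int.ofStr? v).isSome))) = true
instance (entries : List (List (String × String))) : Decidable (Pre_kpi_summary_py entries) := by unfold Pre_kpi_summary_py; infer_instance
def pvWitness_kpi_summary_py : (List (List (String × String))) :=
  [[("connection_invites", "3"), ("events_attended", "")], [("profile_views", " 7 ")]]

def Spec_kpi_summary_py (entries : List (List (String × String))) (out : List (String × Int)) : Prop := out = kpi_summary_py_alt entries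
instance (entries : List (List (String × String))) (out : List (String × Int)) : Decidable (Spec_kpi_summary_py entries out) := by unfold Spec_kpi_summary_py; infer_instance

-- ===== CLAIM (what is proved, stated in full; the proofs are below) =====
def Claim_equal_kpi_summary_py : Prop := ∀ (entries : List (List (String × String))), Dom_kpi_summary_py entries → Pre_kpi_summary_py entries → Spec_kpi_summary_py entries (kpi_summary_py entries)

-- ===== LEMMAS AND PROOFS =====

-- One loop step on the five-key dict updates the four totals in place.
theorem pvStepA_mk (a b c d n : Int) (item : List (String × String)) :
    pvStepA (PySem.Dict.mk [("total_invites", a), ("total_events", b),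
      ("total_new_connections", c), ("total_profile_views", d), ("entries_count", n)]) item
    = PySem.Dict.mk [("total_invites", a + pvCoerce item "connection_invites"),
        ("total_events", b + pvCoerce item "events_attended"),
        ("total_new_connections", c + pvCoerce item "new_connections"),
        ("total_profile_views", d + pvCoerce item "profile_views"), ("entries_count", n)] := by
  simp [pvStepA, PySem.Dict.insert, PySem.Dict.getD, PySem.Dict.get?, PySem.Dict.contains]

-- The fold maintains the five-key dict; each total equals its start plus the per-field sum.
theorem kpi_fold_items (entries : List (List (String × String))) :
    ∀ (a b c d n : Int),
    (entries.foldl pvStepA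
      (PySem.Dict.mk [("total_invites", a), ("total_events", b),
        ("total_new_connections", c), ("total_profile_views", d), ("entries_count", n)])).items
    = [("total_invites", a + (entries.map (fun item => pvCoerce item "connection_invites")).sum),
       ("total_events", b + (entries.map (fun item => pvCoerce item "events_attended")).sum),
       ("total_new_connections", c + (entries.map (fun item => pvCoerce item "new_connections")).sum),
       ("total_profile_views", d + (entries.map (fun item => pvCoerce item "profile_views")).sum),
       ("entries_count", n)] := by
  induction entries with
  | nil => intro a b c d n; simp
  | cons item rest ih =>
    intro a b c d n
    rw [List.foldl_cons, pvStepA_mk, ih]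
    simp [add_assoc]


-- ===== VERDICT (by name: the statement is the Claim_ definition above) =====
theorem kpi_summary_py_spec : Claim_equal_kpi_summary_py := by
  intro entries _ _
  unfold Spec_kpi_summary_py kpi_summary_py kpi_summary_py_alt
  simpa [PySem.Dict.ofList] using kpi_fold_items entries 0 0 0 0 (entries.length : Int)
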